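-- pv_equiv track=rewrite | github.com/leoncorreia/ScenarioSim | backend/app/recommend.py | rule_based_recommendation
-- ===== SOURCE A (Python) =====
-- from typing import Any
--
-- def rule_based_recommendation(
--     scenario: str,
--     variants: list[dict[str, Any]],
-- ) -> tuple[str, str | None]:
--     """Return (summary, recommended_label)."""
--     ok = [v for v in variants if v.get("status") == "ok" and v.get("video_url")]
--     if not ok:
--         return (
--             "No variants completed successfully. Try again or enable demo mode with a valid scenario.",
--             None,
--         )
--     preferred_order = ["best_case", "edge_case", "worst_case"]
--     for key in preferred_order:
--         for v in ok:
--             if v.get("variant_key") == key: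
--                 label = v.get("label") or key
--                 body = (
--                     f'Compared outcomes for your scenario. "{label}" balances upside and feasibility '
--                     "for most planning and communication use cases."
--                 )
--                 return body, label
--     first = ok[0]
--     label = first.get("label") or "Outcome"
--     return (
--         f'"{label}" is the strongest available completed outcome for this run.',
--         label,
--     )
-- ===== SOURCE B (Python) =====
-- def rule_based_recommendation(scenario, variants):
--     """Return (summary, recommended_label)."""
--     ok = [v for v in variants if v.get("status") == "ok" and v.get("video_url")]
--     if not ok:
--         return (
--             "No variants completed successfully. Try again or enable demo mode with a valid scenario.",
--             None,
--         )
--     rank = {"best_case": 0, "edge_case": 1, "worst_case": 2}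
--     best = min(ok, key=lambda v: rank.get(v.get("variant_key"), 3))
--     key = best.get("variant_key")
--     if key in rank:
--         label = best.get("label") or key
--         return (
--             f'Compared outcomes for your scenario. "{label}" balances upside and feasibility '
--             "for most planning and communication use cases.",
--             label,
--         )
--     first = ok[0]
--     label = first.get("label") or "Outcome"
--     return (
--         f'"{label}" is the strongest available completed outcome for this run.',
--         label,
--     )
-- ===== Notes on version B (the rewrite author's own statement) =====
-- stated objective: simpler
-- what changed: Replaced the preference-key-first nested scan over ok with a rank dict and a single stable min over ok by preference rank; the matched/fallback branch is then decided by one membership test on the chosen variant's key.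
import Mathlib
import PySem

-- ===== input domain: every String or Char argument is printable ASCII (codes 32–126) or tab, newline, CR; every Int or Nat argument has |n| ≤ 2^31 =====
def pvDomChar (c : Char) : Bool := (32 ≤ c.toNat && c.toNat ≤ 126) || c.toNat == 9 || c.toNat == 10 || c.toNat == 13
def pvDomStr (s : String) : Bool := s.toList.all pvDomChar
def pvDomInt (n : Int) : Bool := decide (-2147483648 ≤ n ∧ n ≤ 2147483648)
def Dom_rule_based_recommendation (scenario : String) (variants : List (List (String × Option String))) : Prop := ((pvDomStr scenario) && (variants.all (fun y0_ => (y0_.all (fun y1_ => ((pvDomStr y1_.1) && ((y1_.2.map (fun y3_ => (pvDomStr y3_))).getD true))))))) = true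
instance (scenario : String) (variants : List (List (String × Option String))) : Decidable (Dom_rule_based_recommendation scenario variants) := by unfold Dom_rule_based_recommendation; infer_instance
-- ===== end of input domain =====

-- B replaces A's preference-first nested scan with one stable min over ok by a rank dict (simpler one-pass selection); return values proved equal.


-- Shared Python-semantics helpers (both sources contain these same expressions):
-- v.get(k) on a dict whose values are Option String (missing key and stored None both give none)
def pvGet (v : List (String × Option String)) (k : String) : Option String :=
  ((PySem.Dict.mk v).get? k).join

-- Python truthiness of a str-or-None value
def pvTruthy : Option String → Bool
  | some s => s != ""
  | none => false

-- Python `x or d` for x a str-or-None value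
def pvOr (o : Option String) (d : String) : String :=
  match o with
  | some s => if s == "" then d else s
  | none => d

-- the three f-string bodies (identical literals in both sources)
def pvNoneMsg : String :=
  "No variants completed successfully. Try again or enable demo mode with a valid scenario."
def pvMatchedBody (label : String) : String :=
  "Compared outcomes for your scenario. \"" ++ label ++ "\" balances upside and feasibility for most planning and communication use cases."
def pvFallbackBody (label : String) : String :=
  "\"" ++ label ++ "\" is the strongest available completed outcome for this run."

-- ===== PORT A =====
-- inner loop: first v in ok with v.get("variant_key") == key
def ruleAFind (key : String) : List (List (String × Option String)) → Option (List (String × Option String))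
  | [] => none
  | v :: rest => if pvGet v "variant_key" == some key then some v else ruleAFind key rest

-- outer loop over preferred_order
def ruleALoop (ok : List (List (String × Option String))) : List String → Option (String × Option String)
  | [] => none
  | key :: ks =>
    match ruleAFind key ok with
    | some v =>
        let label := pvOr (pvGet v "label") key
        some (pvMatchedBody label, some label)
    | none => ruleALoop ok ks

def rule_based_recommendation (scenario : String) (variants : List (List (String × Option String))) : String × Option String :=
  let ok := variants.filter (fun v => pvGet v "status" == some "ok" && pvTruthy (pvGet v "video_url"))
  if ok.isEmpty then (pvNoneMsg, none)
  else
    match ruleALoop ok ["best_case", "edge_case", "worst_case"] with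
    | some res => res
    | none =>
        let first := ok.headD []
        let label := pvOr (pvGet first "label") "Outcome"
        (pvFallbackBody label, some label)

-- ===== PORT B =====
def ruleRank : PySem.Dict String Int :=
  PySem.Dict.ofList [("best_case", 0), ("edge_case", 1), ("worst_case", 2)]

-- rank.get(v.get("variant_key"), 3)   (a None key is not in the string-keyed dict)
def ruleRankOf (rank : PySem.Dict String Int) (vk : Option String) : Int :=
  match vk with
  | some k => rank.getD k 3
  | none => 3

def rule_based_recommendation_alt (scenario : String) (variants : List (List (String × Option String))) : String × Option String :=
  let ok := variants.filter (fun v => pvGet v "status" == some "ok" && pvTruthy (pvGet v "video_url"))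
  if ok.isEmpty then (pvNoneMsg, none)
  else
    let rank := ruleRank
    match PySem.List.min? ok (fun v => ruleRankOf rank (pvGet v "variant_key")) with
    | none => (pvNoneMsg, none)  -- unreachable: min? is none only on [], and ok ≠ [] here
    | some best =>
        let key := pvGet best "variant_key"
        match key with
        | some k =>
            if rank.contains k then
              let label := pvOr (pvGet best "label") k
              (pvMatchedBody label, some label)
            else
              let first := ok.headD []
              let label := pvOr (pvGet first "label") "Outcome"
              (pvFallbackBody label, some label)
        | none =>
            let first := ok.headD []
            let label := pvOr (pvGet first "label") "Outcome"
            (pvFallbackBody label, some label)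

-- ===== PRECONDITION & SPEC =====
def Spec_rule_based_recommendation (scenario : String) (variants : List (List (String × Option String))) (out : String × Option String) : Prop := out = rule_based_recommendation_alt scenario variants
instance (scenario : String) (variants : List (List (String × Option String))) (out : String × Option String) : Decidable (Spec_rule_based_recommendation scenario variants out) := by unfold Spec_rule_based_recommendation; infer_instance

-- ===== CLAIM (what is proved, stated in full; the proofs are below) =====
def Claim_equal_rule_based_recommendation : Prop := ∀ (scenario : String) (variants : List (List (String × Option String))), Dom_rule_based_recommendation scenario variants → Spec_rule_based_recommendation scenario variants (rule_based_recommendation scenario variants)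

-- ===== LEMMAS AND PROOFS =====

-- the rank function, in closed form
theorem rankOf_eq (vk : Option String) :
    ruleRankOf ruleRank vk =
      if vk == some "best_case" then 0
      else if vk == some "edge_case" then 1
      else if vk == some "worst_case" then 2 else 3 := by
  cases vk with
  | none => simp [ruleRankOf]
  | some k =>
    simp only [ruleRankOf]
    by_cases h1 : k = "best_case"
    · subst h1; decide
    by_cases h2 : k = "edge_case"
    · subst h2; decide
    by_cases h3 : k = "worst_case"
    · subst h3; decide
    rw [show ruleRank = PySem.Dict.mk [("best_case", (0 : Int)), ("edge_case", 1), ("worst_case", 2)] from rfl]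
    simp [PySem.Dict.getD_eq_get?_getD, PySem.Dict.get?_mk_cons, PySem.Dict.get?,
      Ne.symm h1, Ne.symm h2, Ne.symm h3, h1, h2, h3]

theorem rankOf_nonneg (vk : Option String) : 0 ≤ ruleRankOf ruleRank vk := by
  rw [rankOf_eq]; split_ifs <;> norm_num

theorem rank_contains (k : String) :
    ruleRank.contains k = (k == "best_case" || k == "edge_case" || k == "worst_case") := by
  by_cases h1 : k = "best_case"
  · subst h1; decide
  by_cases h2 : k = "edge_case"
  · subst h2; decide
  by_cases h3 : k = "worst_case"
  · subst h3; decide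
  rw [show ruleRank = PySem.Dict.mk [("best_case", (0 : Int)), ("edge_case", 1), ("worst_case", 2)] from rfl]
  simp only [PySem.Dict.contains_mk, List.any_cons, List.any_nil, Bool.or_false]
  rw [beq_eq_false_iff_ne.mpr (Ne.symm h1), beq_eq_false_iff_ne.mpr (Ne.symm h2),
      beq_eq_false_iff_ne.mpr (Ne.symm h3), beq_eq_false_iff_ne.mpr h1,
      beq_eq_false_iff_ne.mpr h2, beq_eq_false_iff_ne.mpr h3]
  decide

-- ruleAFind is List.find?
theorem ruleAFind_eq_find? (key : String) (l : List (List (String × Option String))) :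
    ruleAFind key l = l.find? (fun v => pvGet v "variant_key" == some key) := by
  induction l with
  | nil => rfl
  | cons v rest ih =>
    simp only [ruleAFind, List.find?]
    cases hb : (pvGet v "variant_key" == some key) <;> simp [hb, ih]

-- once the accumulator holds an element no later element beats, the fold keeps it
theorem foldl_min_keep {α : Type} (r : α → Int) (m : α) :
    ∀ t : List α, (∀ y ∈ t, r m ≤ r y) →
      t.foldl (fun acc x => match acc with
                | none => some x
                | some m => if r x < r m then some x else some m) (some m) = some m := by
  intro t
  induction t with
  | nil => intro _; rfl
  | cons y t ih =>
    intro h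
    simp only [List.foldl]
    rw [if_neg (by have := h y (List.mem_cons_self ..); omega)]
    exact ih (fun z hz => h z (List.mem_cons_of_mem _ hz))

-- with a strictly better element ahead, the stable min fold lands on the FIRST element of minimal rank
theorem foldl_min_acc {α : Type} (r : α → Int) (c : Int) :
    ∀ (t : List α) (a : α), c < r a → (∀ y ∈ t, c ≤ r y) → (∃ y ∈ t, r y = c) →
      t.foldl (fun acc x => match acc with
                | none => some x
                | some m => if r x < r m then some x else some m) (some a) =
        t.find? (fun v => r v == c) := by
  intro t
  induction t with
  | nil => intro a _ _ hex; simp at hex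
  | cons y t ih =>
    intro a ha hb hex
    simp only [List.foldl, List.find?]
    by_cases hy : r y = c
    · rw [if_pos (by omega)]
      rw [show (r y == c) = true from by simp [hy]]
      exact foldl_min_keep r y t (fun z hz => by have := hb z (List.mem_cons_of_mem _ hz); omega)
    · rw [show (r y == c) = false from by simp [hy]]
      have hyc : c < r y := lt_of_le_of_ne (hb y (List.mem_cons_self ..)) (Ne.symm hy)
      have hex' : ∃ z ∈ t, r z = c := by
        obtain ⟨z, hz, hzc⟩ := hex
        rcases List.mem_cons.mp hz with rfl | hz
        · exact absurd hzc hy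
        · exact ⟨z, hz, hzc⟩
      by_cases hlt : r y < r a
      · rw [if_pos hlt]; exact ih y hyc (fun z hz => hb z (List.mem_cons_of_mem _ hz)) hex'
      · rw [if_neg hlt]; exact ih a ha (fun z hz => hb z (List.mem_cons_of_mem _ hz)) hex'

-- the stable min is the first element attaining the minimum value
theorem min?_eq_find? {α : Type} (r : α → Int) (c : Int) (l : List α)
    (hb : ∀ y ∈ l, c ≤ r y) (hex : ∃ y ∈ l, r y = c) :
    PySem.List.min? l r = l.find? (fun v => r v == c) := by
  cases l with
  | nil => simp at hex
  | cons x t =>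
    show List.foldl _ (some x) t = _
    simp only [List.find?]
    by_cases hx : r x = c
    · rw [show (r x == c) = true from by simp [hx]]
      exact foldl_min_keep r x t (fun z hz => by have := hb z (List.mem_cons_of_mem _ hz); omega)
    · rw [show (r x == c) = false from by simp [hx]]
      have hxc : c < r x := lt_of_le_of_ne (hb x (List.mem_cons_self ..)) (Ne.symm hx)
      have hex' : ∃ z ∈ t, r z = c := by
        obtain ⟨z, hz, hzc⟩ := hex
        rcases List.mem_cons.mp hz with rfl | hz
        · exact absurd hzc hx
        · exact ⟨z, hz, hzc⟩
      exact foldl_min_acc r c t x hxc (fun z hz => hb z (List.mem_cons_of_mem _ hz)) hex'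

-- the rank values in closed form, per preference key
theorem rankOf_zero_iff (vk : Option String) :
    ruleRankOf ruleRank vk = 0 ↔ vk = some "best_case" := by
  rw [rankOf_eq]; split_ifs <;> simp_all <;> omega

theorem rankOf_one_iff (vk : Option String) :
    ruleRankOf ruleRank vk = 1 ↔ vk = some "edge_case" := by
  rw [rankOf_eq]; split_ifs <;> simp_all <;> omega

theorem rankOf_two_iff (vk : Option String) :
    ruleRankOf ruleRank vk = 2 ↔ vk = some "worst_case" := by
  rw [rankOf_eq]; split_ifs <;> simp_all <;> omega

theorem rankOf_cases (vk : Option String) :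
    ruleRankOf ruleRank vk = 0 ∨ ruleRankOf ruleRank vk = 1 ∨
    ruleRankOf ruleRank vk = 2 ∨ ruleRankOf ruleRank vk = 3 := by
  rw [rankOf_eq]; split_ifs <;> simp

-- the two find? predicates coincide when rank c characterises key
theorem find?_rank_eq (c : Int) (key : String)
    (h : ∀ vk : Option String, ruleRankOf ruleRank vk = c ↔ vk = some key)
    (ok : List (List (String × Option String))) :
    ok.find? (fun v => ruleRankOf ruleRank (pvGet v "variant_key") == c) =
      ok.find? (fun v => pvGet v "variant_key" == some key) := by
  congr 1
  funext v
  by_cases hv : pvGet v "variant_key" = some key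
  · rw [hv]; simp [(h (some key)).mpr rfl]
  · rw [beq_eq_false_iff_ne.mpr hv,
        beq_eq_false_iff_ne.mpr (fun hc => hv ((h _).mp hc))]

-- the core equivalence, on the already-filtered list
theorem core_eq (ok : List (List (String × Option String))) (hne : ok ≠ []) :
    (match ruleALoop ok ["best_case", "edge_case", "worst_case"] with
     | some res => res
     | none =>
         let first := ok.headD []
         let label := pvOr (pvGet first "label") "Outcome"
         (pvFallbackBody label, some label)) =
    (match PySem.List.min? ok (fun v => ruleRankOf ruleRank (pvGet v "variant_key")) with
     | none => (pvNoneMsg, none)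
     | some best =>
         match pvGet best "variant_key" with
         | some k =>
             if ruleRank.contains k then
               let label := pvOr (pvGet best "label") k
               (pvMatchedBody label, some label)
             else
               let first := ok.headD []
               let label := pvOr (pvGet first "label") "Outcome"
               (pvFallbackBody label, some label)
         | none =>
             let first := ok.headD []
             let label := pvOr (pvGet first "label") "Outcome"
             (pvFallbackBody label, some label)) := by
  simp only [ruleALoop, ruleAFind_eq_find?]
  have hb0 : ∀ y ∈ ok, (0:Int) ≤ ruleRankOf ruleRank (pvGet y "variant_key") :=
    fun y _ => rankOf_nonneg _
  cases h0 : ok.find? (fun v => pvGet v "variant_key" == some "best_case") with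
  | some v =>
    have hp : pvGet v "variant_key" = some "best_case" := by
      simpa using List.find?_some h0
    have hmin : PySem.List.min? ok (fun v => ruleRankOf ruleRank (pvGet v "variant_key")) = some v := by
      rw [min?_eq_find? _ 0 ok hb0
            ⟨v, List.mem_of_find?_eq_some h0, (rankOf_zero_iff _).mpr hp⟩,
          find?_rank_eq 0 "best_case" rankOf_zero_iff, h0]
    rw [hmin]
    simp [hp, rank_contains]
  | none =>
    have n0 : ∀ y ∈ ok, pvGet y "variant_key" ≠ some "best_case" := by
      intro y hy
      have := List.find?_eq_none.mp h0 y hy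
      simpa using this
    have hb1 : ∀ y ∈ ok, (1:Int) ≤ ruleRankOf ruleRank (pvGet y "variant_key") := by
      intro y hy
      have hne : ruleRankOf ruleRank (pvGet y "variant_key") ≠ 0 :=
        fun hc => n0 y hy ((rankOf_zero_iff _).mp hc)
      rcases rankOf_cases (pvGet y "variant_key") with h | h | h | h <;> omega
    cases h1 : ok.find? (fun v => pvGet v "variant_key" == some "edge_case") with
    | some v =>
      have hp : pvGet v "variant_key" = some "edge_case" := by
        simpa using List.find?_some h1
      have hmin : PySem.List.min? ok (fun v => ruleRankOf ruleRank (pvGet v "variant_key")) = some v := by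
        rw [min?_eq_find? _ 1 ok hb1
              ⟨v, List.mem_of_find?_eq_some h1, (rankOf_one_iff _).mpr hp⟩,
            find?_rank_eq 1 "edge_case" rankOf_one_iff, h1]
      rw [hmin]
      simp [hp, rank_contains]
    | none =>
      have n1 : ∀ y ∈ ok, pvGet y "variant_key" ≠ some "edge_case" := by
        intro y hy
        have := List.find?_eq_none.mp h1 y hy
        simpa using this
      have hb2 : ∀ y ∈ ok, (2:Int) ≤ ruleRankOf ruleRank (pvGet y "variant_key") := by
        intro y hy
        have hne0 : ruleRankOf ruleRank (pvGet y "variant_key") ≠ 0 :=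
          fun hc => n0 y hy ((rankOf_zero_iff _).mp hc)
        have hne1 : ruleRankOf ruleRank (pvGet y "variant_key") ≠ 1 :=
          fun hc => n1 y hy ((rankOf_one_iff _).mp hc)
        rcases rankOf_cases (pvGet y "variant_key") with h | h | h | h <;> omega
      cases h2 : ok.find? (fun v => pvGet v "variant_key" == some "worst_case") with
      | some v =>
        have hp : pvGet v "variant_key" = some "worst_case" := by
          simpa using List.find?_some h2
        have hmin : PySem.List.min? ok (fun v => ruleRankOf ruleRank (pvGet v "variant_key")) = some v := by
          rw [min?_eq_find? _ 2 ok hb2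
                ⟨v, List.mem_of_find?_eq_some h2, (rankOf_two_iff _).mpr hp⟩,
              find?_rank_eq 2 "worst_case" rankOf_two_iff, h2]
        rw [hmin]
        simp [hp, rank_contains]
      | none =>
        have n2 : ∀ y ∈ ok, pvGet y "variant_key" ≠ some "worst_case" := by
          intro y hy
          have := List.find?_eq_none.mp h2 y hy
          simpa using this
        have h3 : ∀ y ∈ ok, ruleRankOf ruleRank (pvGet y "variant_key") = 3 := by
          intro y hy
          have hne0 : ruleRankOf ruleRank (pvGet y "variant_key") ≠ 0 :=
            fun hc => n0 y hy ((rankOf_zero_iff _).mp hc)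
          have hne1 : ruleRankOf ruleRank (pvGet y "variant_key") ≠ 1 :=
            fun hc => n1 y hy ((rankOf_one_iff _).mp hc)
          have hne2 : ruleRankOf ruleRank (pvGet y "variant_key") ≠ 2 :=
            fun hc => n2 y hy ((rankOf_two_iff _).mp hc)
          rcases rankOf_cases (pvGet y "variant_key") with h | h | h | h <;> omega
        obtain ⟨x, t, rfl⟩ : ∃ x t, ok = x :: t := by
          cases ok with
          | nil => exact absurd rfl hne
          | cons x t => exact ⟨x, t, rfl⟩
        have hmin : PySem.List.min? (x :: t) (fun v => ruleRankOf ruleRank (pvGet v "variant_key")) = some x := by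
          rw [min?_eq_find? _ 3 (x :: t) (fun y hy => le_of_eq (h3 y hy).symm)
              ⟨x, List.mem_cons_self .., h3 x (List.mem_cons_self ..)⟩]
          simp [List.find?, h3 x (List.mem_cons_self ..)]
        rw [hmin]
        cases hk : pvGet x "variant_key" with
        | none => simp [hk]
        | some k =>
          have hc : ruleRank.contains k = false := by
            rw [rank_contains]
            have e0 : k ≠ "best_case" := fun h => n0 x (List.mem_cons_self ..) (by rw [hk, h])
            have e1 : k ≠ "edge_case" := fun h => n1 x (List.mem_cons_self ..) (by rw [hk, h])
            have e2 : k ≠ "worst_case" := fun h => n2 x (List.mem_cons_self ..) (by rw [hk, h])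
            rw [beq_eq_false_iff_ne.mpr e0, beq_eq_false_iff_ne.mpr e1, beq_eq_false_iff_ne.mpr e2]
            decide
          simp [hk, hc]

-- ===== VERDICT (by name: the statement is the Claim_ definition above) =====
theorem rule_based_recommendation_spec : Claim_equal_rule_based_recommendation := by
  intro scenario variants _
  unfold Spec_rule_based_recommendation rule_based_recommendation rule_based_recommendation_alt
  set ok := variants.filter (fun v => pvGet v "status" == some "ok" && pvTruthy (pvGet v "video_url")) with hok
  by_cases h : ok.isEmpty
  · simp [h]
  · simp only [h, if_false]
    exact core_eq ok (by simpa [List.isEmpty_iff] using h)
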